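-- pv_equiv track=rewrite | github.com/devopsplaynew/cronet | newfolder4/adm_api.py | evaluate_aod_final
-- ===== SOURCE A (Python) =====
-- def evaluate_aod_final(rows, total_count):
--     positions_ids = {
--         r["original_message_id"]
--         for r in rows
--         if r["marker_type_cd"] == "asOfRegionsStatementsPublished" and r["subject_area_cd"] == "positions"
--     }
--     taxlots_ids = {
--         r["original_message_id"]
--         for r in rows
--         if r["marker_type_cd"] == "asOfRegionsStatementsPublished" and r["subject_area_cd"] == "taxlots"
--     }
--     global_marker = any(r["marker_type_cd"] == "eodAllRegionStatementsPublished" for r in rows)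
--
--     pos_count, tax_count = len(positions_ids), len(taxlots_ids)
--
--     if total_count == 0:
--         return "pending", pos_count, tax_count
--     if pos_count == total_count and tax_count == total_count and global_marker:
--         return "completed", pos_count, tax_count
--     elif pos_count or tax_count or global_marker:
--         return "inprogress", pos_count, tax_count
--     return "pending", pos_count, tax_count
-- ===== SOURCE B (Python) =====
-- def _ndistinct(vals):
--     # distinct count by sort-then-scan: duplicates are adjacent after sorting
--     vals = sorted(vals)
--     count = 0
--     prev = None
--     for v in vals:
--         if prev is None or v != prev:
--             count += 1
--         prev = v
--     return count
--
--
-- def evaluate_aod_final(rows, total_count):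
--     pos_ids, tax_ids = [], []
--     global_marker = False
--     for r in rows:
--         m = r["marker_type_cd"]
--         if m == "eodAllRegionStatementsPublished":
--             global_marker = True
--         elif m == "asOfRegionsStatementsPublished":
--             s = r["subject_area_cd"]
--             if s == "positions":
--                 pos_ids.append(r["original_message_id"])
--             elif s == "taxlots":
--                 tax_ids.append(r["original_message_id"])
--     pos_count, tax_count = _ndistinct(pos_ids), _ndistinct(tax_ids)
--     if total_count == 0:
--         return "pending", pos_count, tax_count
--     if pos_count == total_count and tax_count == total_count and global_marker:
--         return "completed", pos_count, tax_count
--     if pos_count or tax_count or global_marker: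
--         return "inprogress", pos_count, tax_count
--     return "pending", pos_count, tax_count
-- ===== Notes on version B (the rewrite author's own statement) =====
-- stated objective: alternative
-- what changed: B replaces A's hash-set comprehensions by a single partitioning pass that collects the two id lists plus the global flag, then counts distinct ids by sorting each list and scanning adjacent pairs (sort-then-scan dedup instead of hash sets).
import Mathlib
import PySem

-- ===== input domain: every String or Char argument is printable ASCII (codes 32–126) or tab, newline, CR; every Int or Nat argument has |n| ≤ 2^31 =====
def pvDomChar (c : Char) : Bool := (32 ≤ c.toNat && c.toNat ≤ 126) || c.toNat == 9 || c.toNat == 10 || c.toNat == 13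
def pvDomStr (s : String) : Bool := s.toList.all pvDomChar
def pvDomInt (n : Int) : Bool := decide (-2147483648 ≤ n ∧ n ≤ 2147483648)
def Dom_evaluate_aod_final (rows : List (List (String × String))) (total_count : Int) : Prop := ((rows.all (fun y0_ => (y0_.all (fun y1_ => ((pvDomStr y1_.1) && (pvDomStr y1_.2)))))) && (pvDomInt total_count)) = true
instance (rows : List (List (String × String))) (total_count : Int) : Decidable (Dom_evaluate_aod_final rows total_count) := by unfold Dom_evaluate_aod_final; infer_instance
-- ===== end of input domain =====

-- B replaces A's hash-set comprehensions by one partitioning pass collecting the two id lists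
-- and the flag, then counts distinct ids per list by sort-then-scan instead of hash sets.

-- r[k] for a row dict; the .getD "" is only ever reached outside Pre_ (where Python raises KeyError)
def pvLook (r : List (String × String)) (k : String) : String :=
  ((PySem.Dict.ofList r).get? k).getD ""

def pvHas (r : List (String × String)) (k : String) : Bool :=
  ((PySem.Dict.ofList r).get? k).isSome

-- ===== PORT A =====
def evaluate_aod_final (rows : List (List (String × String))) (total_count : Int) : String × Int × Int :=
  let positions_ids : PySem.Set String :=
    PySem.Set.ofList ((rows.filter (fun r =>
      pvLook r "marker_type_cd" == "asOfRegionsStatementsPublished" &&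
      pvLook r "subject_area_cd" == "positions")).map (fun r => pvLook r "original_message_id"))
  let taxlots_ids : PySem.Set String :=
    PySem.Set.ofList ((rows.filter (fun r =>
      pvLook r "marker_type_cd" == "asOfRegionsStatementsPublished" &&
      pvLook r "subject_area_cd" == "taxlots")).map (fun r => pvLook r "original_message_id"))
  let global_marker : Bool :=
    rows.any (fun r => pvLook r "marker_type_cd" == "eodAllRegionStatementsPublished")
  let pos_count : Int := (positions_ids.length : Int)
  let tax_count : Int := (taxlots_ids.length : Int)
  if total_count = 0 then ("pending", pos_count, tax_count)
  else if pos_count = total_count ∧ tax_count = total_count ∧ global_marker then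
    ("completed", pos_count, tax_count)
  else if pos_count ≠ 0 ∨ tax_count ≠ 0 ∨ global_marker then
    ("inprogress", pos_count, tax_count)
  else ("pending", pos_count, tax_count)

-- ===== PORT B =====
-- _ndistinct from Source B: sort, then the prev-scan counting loop (state = (prev, count))
def pvNdistinct (vals : List String) : Int :=
  let sortedVals := PySem.List.sorted vals (fun v => v) false
  (sortedVals.foldl
    (fun st v => (some v, if st.1 = none ∨ some v ≠ st.1 then st.2 + 1 else st.2))
    ((none : Option String), (0 : Int))).2

-- loop body of Source B's partitioning for-loop; state = (pos_ids, tax_ids, global_marker)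
def pvPart (st : List String × List String × Bool) (r : List (String × String)) :
    List String × List String × Bool :=
  if pvLook r "marker_type_cd" == "eodAllRegionStatementsPublished" then
    (st.1, st.2.1, true)
  else if pvLook r "marker_type_cd" == "asOfRegionsStatementsPublished" then
    if pvLook r "subject_area_cd" == "positions" then
      (st.1 ++ [pvLook r "original_message_id"], st.2.1, st.2.2)
    else if pvLook r "subject_area_cd" == "taxlots" then
      (st.1, st.2.1 ++ [pvLook r "original_message_id"], st.2.2)
    else st
  else st

def evaluate_aod_final_alt (rows : List (List (String × String))) (total_count : Int) : String × Int × Int :=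
  let st := rows.foldl pvPart ([], [], false)
  let pos_count : Int := pvNdistinct st.1
  let tax_count : Int := pvNdistinct st.2.1
  let global_marker := st.2.2
  if total_count = 0 then ("pending", pos_count, tax_count)
  else if pos_count = total_count ∧ tax_count = total_count ∧ global_marker then
    ("completed", pos_count, tax_count)
  else if pos_count ≠ 0 ∨ tax_count ≠ 0 ∨ global_marker then
    ("inprogress", pos_count, tax_count)
  else ("pending", pos_count, tax_count)

-- ===== PRECONDITION & SPEC =====
-- Pre_ excludes exactly the inputs on which A raises KeyError: a row lacking "marker_type_cd", or lacking
-- "subject_area_cd" when its marker is "asOfRegionsStatementsPublished", or lacking "original_message_id"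
-- when additionally its subject area is "positions" or "taxlots".
def pvRowOK (r : List (String × String)) : Bool :=
  pvHas r "marker_type_cd" &&
  (!(pvLook r "marker_type_cd" == "asOfRegionsStatementsPublished") ||
    (pvHas r "subject_area_cd" &&
      (!(pvLook r "subject_area_cd" == "positions" || pvLook r "subject_area_cd" == "taxlots") ||
        pvHas r "original_message_id")))

def Pre_evaluate_aod_final (rows : List (List (String × String))) (total_count : Int) : Prop :=
  rows.all pvRowOK = true

instance (rows : List (List (String × String))) (total_count : Int) : Decidable (Pre_evaluate_aod_final rows total_count) := by unfold Pre_evaluate_aod_final; infer_instance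

def pvWitness_evaluate_aod_final : (List (List (String × String))) × Int :=
  ([[("marker_type_cd", "asOfRegionsStatementsPublished"), ("subject_area_cd", "positions"), ("original_message_id", "m1")],
    [("marker_type_cd", "eodAllRegionStatementsPublished")]], 1)

def Spec_evaluate_aod_final (rows : List (List (String × String))) (total_count : Int) (out : String × Int × Int) : Prop := out = evaluate_aod_final_alt rows total_count
instance (rows : List (List (String × String))) (total_count : Int) (out : String × Int × Int) : Decidable (Spec_evaluate_aod_final rows total_count out) := by unfold Spec_evaluate_aod_final; infer_instance

-- ===== CLAIM (what is proved, stated in full; the proofs are below) =====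
def Claim_equal_evaluate_aod_final : Prop := ∀ (rows : List (List (String × String))) (total_count : Int), Dom_evaluate_aod_final rows total_count → Pre_evaluate_aod_final rows total_count → Spec_evaluate_aod_final rows total_count (evaluate_aod_final rows total_count)

-- ===== LEMMAS AND PROOFS =====

-- recursive view of the prev-scan counting loop
def pvCnt : Option String → List String → Int
  | _, [] => 0
  | prev, v :: vs => (if prev = none ∨ some v ≠ prev then 1 else 0) + pvCnt (some v) vs

lemma pvFoldl_cnt (l : List String) (prev : Option String) (c : Int) :
    (l.foldl (fun st v => (some v, if st.1 = none ∨ some v ≠ st.1 then st.2 + 1 else st.2))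
      (prev, c)).2 = c + pvCnt prev l := by
  induction l generalizing prev c with
  | nil => simp [pvCnt]
  | cons v vs ih => simp [pvCnt, ih]; split_ifs <;> ring

lemma pvCard_insert (v : String) (S : Finset String) :
    (insert v S).card = (S.erase v).card + 1 := by
  have h : insert v S = insert v (S.erase v) := by
    ext x; simp [Finset.mem_insert, Finset.mem_erase]; tauto
  rw [h, Finset.card_insert_of_notMem (Finset.notMem_erase v S)]

lemma pvCnt_some (l : List String) (h : l.Pairwise (· ≤ ·)) (p : String)
    (hp : ∀ x ∈ l, p ≤ x) :
    pvCnt (some p) l = ((l.toFinset.erase p).card : Int) := by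
  induction l generalizing p with
  | nil => simp [pvCnt]
  | cons v vs ih =>
    have hpv : p ≤ v := hp v (by simp)
    have hvs : ∀ x ∈ vs, v ≤ x := fun x hx => (List.pairwise_cons.mp h).1 x hx
    have htail := ih (List.pairwise_cons.mp h).2 v hvs
    by_cases hvp : v = p
    · subst hvp
      simp [pvCnt, htail, List.toFinset_cons]
    · have hpnot : p ∉ insert v vs.toFinset := by
        simp only [Finset.mem_insert, List.mem_toFinset]
        rintro (rfl | hmem)
        · exact hvp rfl
        · exact hvp (le_antisymm hpv (hvs p hmem)).symm
      have hne : some v ≠ some p := by simpa using fun e => hvp e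
      simp only [pvCnt, htail, List.toFinset_cons]
      rw [Finset.erase_eq_of_notMem hpnot, pvCard_insert]
      simp [hne]
      ring

lemma pvCnt_none (l : List String) (h : l.Pairwise (· ≤ ·)) :
    pvCnt none l = (l.toFinset.card : Int) := by
  cases l with
  | nil => simp [pvCnt]
  | cons v vs =>
    have hvs : ∀ x ∈ vs, v ≤ x := fun x hx => (List.pairwise_cons.mp h).1 x hx
    simp only [pvCnt, pvCnt_some vs (List.pairwise_cons.mp h).2 v hvs, List.toFinset_cons]
    rw [pvCard_insert]
    simp
    ring

-- the sort-then-scan distinct count equals the hash-set cardinality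
lemma pvNdistinct_eq (l : List String) :
    pvNdistinct l = ((PySem.Set.ofList l).length : Int) := by
  unfold pvNdistinct
  have hperm : (PySem.List.sorted l (fun v => v) false).Perm l := PySem.List.sorted_perm l _ _
  have hpair : (PySem.List.sorted l (fun v => v) false).Pairwise (· ≤ ·) := by
    simpa using PySem.List.sorted_pairwise l (fun v => v)
  rw [pvFoldl_cnt, pvCnt_none _ hpair, (List.toFinset_eq_of_perm _ _ hperm)]
  rw [Int.zero_add]
  have hset : (PySem.Set.ofList l).length = l.toFinset.card := by
    have hnd : (PySem.Set.ofList l).Nodup := PySem.Set.nodup_ofList l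
    have hfs : (PySem.Set.ofList l).toFinset = l.toFinset := by
      ext x; simp [List.mem_toFinset, PySem.Set.mem_ofList]
    rw [← hfs, List.toFinset_card_of_nodup hnd]
  rw [hset]

-- B's partitioning fold collects exactly A's two filtered id lists and the any-flag
lemma pvPart_eq (rows : List (List (String × String)))
    (p t : List String) (g : Bool) :
    rows.foldl pvPart (p, t, g) =
      (p ++ (rows.filter (fun r =>
          pvLook r "marker_type_cd" == "asOfRegionsStatementsPublished" &&
          pvLook r "subject_area_cd" == "positions")).map (fun r => pvLook r "original_message_id"),
       t ++ (rows.filter (fun r =>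
          pvLook r "marker_type_cd" == "asOfRegionsStatementsPublished" &&
          pvLook r "subject_area_cd" == "taxlots")).map (fun r => pvLook r "original_message_id"),
       g || rows.any (fun r => pvLook r "marker_type_cd" == "eodAllRegionStatementsPublished")) := by
  induction rows generalizing p t g with
  | nil => simp
  | cons r rs ih =>
    simp only [List.foldl_cons, List.filter_cons, List.any_cons]
    by_cases he : pvLook r "marker_type_cd" == "eodAllRegionStatementsPublished"
    · have hm : (pvLook r "marker_type_cd" == "asOfRegionsStatementsPublished") = false := by
        simp only [beq_iff_eq] at he ⊢; simp [he]
      simp [pvPart, he, hm, ih]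
    · by_cases hm : pvLook r "marker_type_cd" == "asOfRegionsStatementsPublished"
      · by_cases hp : pvLook r "subject_area_cd" == "positions"
        · have ht : (pvLook r "subject_area_cd" == "taxlots") = false := by
            simp only [beq_iff_eq] at hp ⊢; simp [hp]
          simp [pvPart, he, hm, hp, ht, ih]
        · by_cases ht : pvLook r "subject_area_cd" == "taxlots"
          · simp [pvPart, he, hm, hp, ht, ih]
          · simp [pvPart, he, hm, hp, ht, ih]
      · simp [pvPart, he, hm, ih]

-- ===== VERDICT (by name: the statement is the Claim_ definition above) =====
theorem evaluate_aod_final_spec : Claim_equal_evaluate_aod_final := by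
  intro rows _total_count _ _
  unfold Spec_evaluate_aod_final evaluate_aod_final evaluate_aod_final_alt
  rw [pvPart_eq]
  simp only [List.nil_append, pvNdistinct_eq, Bool.false_or]
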